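-- pv_equiv track=rewrite | github.com/dzima1asd/Python-projekty | szyfr3D_106.py | decrypt_from_scyphrogram
-- ===== SOURCE A (Python) =====
-- import math
--
-- def get_coordinates(char, key_char, chars, size):
--     char_value = chars.index(char) + 1
--     key_value = chars.index(key_char) + 1
--     return (char_value + key_value) % size
--
-- def decrypt_from_scyphrogram(scyphrogram, white_key, black_key, chars):
--     table_size = int(math.sqrt(len(scyphrogram)))
--     tables = [scyphrogram[i:i + table_size * table_size] for i in range(0, len(scyphrogram), table_size * table_size)]
--     decrypted_sequences = []
--     for i, table_data in enumerate(tables):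
--         table = list(table_data)
--         opal = get_coordinates(black_key[i % len(black_key)], white_key[i % len(white_key)], chars, table_size)
--         iryd = get_coordinates(black_key[(i + 1) % len(black_key)], white_key[(i + 1) % len(white_key)], chars, table_size)
--         sequence = []
--         x, y = opal, iryd
--         for _ in range(10):
--             if y * table_size + x < len(table):
--                 sequence.append(table[y * table_size + x])
--             else:
--                 break
--             x = (x + 1) % table_size
--             if x == 0:
--                 y = (y + 1) % table_size
--         decrypted_sequences.append(''.join(sequence))
--     return ''.join(decrypted_sequences)
-- ===== SOURCE B (Python) =====
-- import math
--
-- def decrypt_from_scyphrogram(scyphrogram, white_key, black_key, chars):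
--     ts = math.isqrt(len(scyphrogram))
--     area = ts * ts
--
--     def coord(i):
--         return (chars.index(black_key[i % len(black_key)])
--                 + chars.index(white_key[i % len(white_key)]) + 2) % ts
--
--     pieces = []
--     for i, base in enumerate(range(0, len(scyphrogram), area)):
--         table = scyphrogram[base:base + area]
--         start = coord(i + 1) * ts + coord(i)
--         if len(table) == area:
--             # full table: the 10 reads wrap cyclically; repeat just enough copies
--             reps = (start + 10 + area - 1) // area
--             pieces.append((table * reps)[start:start + 10])
--         else:
--             # trailing partial table: reads stop at the first index past the end
--             pieces.append(table[start:start + 10])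
--     return ''.join(pieces)
-- ===== Notes on version B (the rewrite author's own statement) =====
-- stated objective: alternative
-- what changed: B eliminates A's per-character inner loop with its (x,y) coordinate pair and carry branch entirely: for each table it computes one start index and takes the 10 characters as a single Python slice (of the table for a partial trailing table, of the cyclically repeated table for a full one).
import Mathlib
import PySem

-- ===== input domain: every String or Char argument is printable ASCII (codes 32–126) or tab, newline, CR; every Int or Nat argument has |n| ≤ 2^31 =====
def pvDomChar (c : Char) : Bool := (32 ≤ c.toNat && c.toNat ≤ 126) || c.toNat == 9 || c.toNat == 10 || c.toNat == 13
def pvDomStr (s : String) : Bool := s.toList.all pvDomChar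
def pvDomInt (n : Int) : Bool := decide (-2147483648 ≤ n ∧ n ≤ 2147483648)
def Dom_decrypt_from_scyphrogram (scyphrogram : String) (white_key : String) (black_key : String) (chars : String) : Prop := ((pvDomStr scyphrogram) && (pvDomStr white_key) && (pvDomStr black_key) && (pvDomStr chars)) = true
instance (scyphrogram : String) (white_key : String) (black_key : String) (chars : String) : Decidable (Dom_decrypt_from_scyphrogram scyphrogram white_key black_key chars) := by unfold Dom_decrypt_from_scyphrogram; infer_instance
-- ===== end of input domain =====

-- B replaces A's per-character inner loop (the (x,y) pair with its carry branch) by a single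
-- slice per table: of the table itself for a partial trailing table, of the cyclically repeated
-- table for a full one (objective: alternative — bulk slicing instead of a per-character loop).

-- ===== PORT A =====
-- Kernel-transparent integer square root (largest k with k*k ≤ n), used by both ports:
-- 'int(math.sqrt(n))' in A and 'math.isqrt(n)' in B agree with it for every length a Dom
-- string can have (float sqrt is correctly rounded, so the two agree for all n < 2^52).
def pvIsqrtAux (n : Nat) : Nat → Nat
  | 0 => 0
  | k + 1 => if (k + 1) * (k + 1) ≤ n then k + 1 else pvIsqrtAux n k

def pvIsqrt (n : Nat) : Nat := pvIsqrtAux n n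
-- chars.index(c): PySem.List.index?; the .getD 0 default is reached only where Python raises
-- ValueError (excluded by Pre_).
def pvGetCoordinates (c : Char) (keyChar : Char) (cs : List Char) (size : Nat) : Nat :=
  (((PySem.List.index? cs c).getD 0 + 1) + ((PySem.List.index? cs keyChar).getD 0 + 1)) % size

-- 'for _ in range(10)' with break: fuel-counted recursion over the (x, y) state.
def pvAInner (t : List Char) (ts : Nat) : Nat → Nat → Nat → List Char → List Char
  | 0, _, _, acc => acc
  | fuel + 1, x, y, acc =>
      if y * ts + x < t.length then
        let acc' := acc ++ [t.getD (y * ts + x) ' ']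
        let x' := (x + 1) % ts
        let y' := if x' = 0 then (y + 1) % ts else y
        pvAInner t ts fuel x' y' acc'
      else acc

-- 'for i, table_data in enumerate(tables)': structural recursion with a Nat counter,
-- accumulating decrypted_sequences.
def pvAGo (w b cs : List Char) (ts : Nat) : List (List Char) → Nat → List (List Char) → List (List Char)
  | [], _, acc => acc
  | t :: rest, i, acc =>
      let opal := pvGetCoordinates (b.getD (i % b.length) ' ') (w.getD (i % w.length) ' ') cs ts
      let iryd := pvGetCoordinates (b.getD ((i + 1) % b.length) ' ') (w.getD ((i + 1) % w.length) ' ') cs ts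
      pvAGo w b cs ts rest (i + 1) (acc ++ [pvAInner t ts 10 opal iryd []])

def decrypt_from_scyphrogram (scyphrogram : String) (white_key : String) (black_key : String) (chars : String) : String :=
  let s := scyphrogram.toList
  let ts := pvIsqrt s.length
  let area := ts * ts
  let tables := (PySem.List.pyRange 0 (s.length : Int) (area : Int)).map
      (fun i => PySem.List.slice s (some i) (some (i + (area : Int))))
  String.ofList (pvAGo white_key.toList black_key.toList chars.toList ts tables 0 []).flatten

-- ===== PORT B =====
-- B's local 'coord(i)': (chars.index(black_key[i%|b|]) + chars.index(white_key[i%|w|]) + 2) % ts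
def pvCoord (w b cs : List Char) (ts i : Nat) : Nat :=
  ((PySem.List.index? cs (b.getD (i % b.length) ' ')).getD 0
   + (PySem.List.index? cs (w.getD (i % w.length) ' ')).getD 0 + 2) % ts

-- 'for i, base in enumerate(range(0, len, area))', appending one slice per table.
def pvBGo (s w b cs : List Char) (ts area : Nat) : List Int → Nat → List (List Char) → List (List Char)
  | [], _, pieces => pieces
  | base :: rest, i, pieces =>
      let table := PySem.List.slice s (some base) (some (base + (area : Int)))
      let start := pvCoord w b cs ts (i + 1) * ts + pvCoord w b cs ts i
      let piece :=
        if table.length = area then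
          PySem.List.slice ((List.replicate ((start + 10 + area - 1) / area) table).flatten)
            (some (start : Int)) (some ((start : Int) + 10))
        else
          PySem.List.slice table (some (start : Int)) (some ((start : Int) + 10))
      pvBGo s w b cs ts area rest (i + 1) (pieces ++ [piece])

def decrypt_from_scyphrogram_alt (scyphrogram : String) (white_key : String) (black_key : String) (chars : String) : String :=
  let s := scyphrogram.toList
  let ts := pvIsqrt s.length
  let area := ts * ts
  String.ofList (pvBGo s white_key.toList black_key.toList chars.toList ts area
      (PySem.List.pyRange 0 (s.length : Int) (area : Int)) 0 []).flatten

-- ===== PRECONDITION & SPEC =====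
-- Pre_: exactly the inputs where Python A returns normally — a nonempty scyphrogram (an empty one
-- makes range(0, 0, 0) raise ValueError), nonempty keys (empty ones raise ZeroDivisionError on '%'),
-- and every key character actually consulted (positions i and i+1 mod the key length, for each of the
-- ceil(n/area) tables) present in chars (a missing one makes chars.index raise ValueError).
-- For the unique ts with ts² ≤ |s| < (ts+1)², every key character the loop consults for the
-- ⌈|s|/ts²⌉ tables must occur in chars (otherwise chars.index raises ValueError).
def pvTsOk (s w b cs : List Char) (ts : Nat) : Bool :=
  !(decide (ts * ts ≤ s.length) && decide (s.length < (ts + 1) * (ts + 1))) ||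
  (List.range ((s.length + ts * ts - 1) / (ts * ts))).all (fun i =>
    cs.contains (b.getD (i % b.length) ' ') && cs.contains (w.getD (i % w.length) ' ') &&
    cs.contains (b.getD ((i + 1) % b.length) ' ') && cs.contains (w.getD ((i + 1) % w.length) ' '))

def Pre_decrypt_from_scyphrogram (scyphrogram : String) (white_key : String) (black_key : String) (chars : String) : Prop :=
  (!scyphrogram.toList.isEmpty && !white_key.toList.isEmpty && !black_key.toList.isEmpty &&
   (List.range (scyphrogram.toList.length + 1)).all
     (pvTsOk scyphrogram.toList white_key.toList black_key.toList chars.toList)) = true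
instance (scyphrogram : String) (white_key : String) (black_key : String) (chars : String) : Decidable (Pre_decrypt_from_scyphrogram scyphrogram white_key black_key chars) := by unfold Pre_decrypt_from_scyphrogram; infer_instance

def pvWitness_decrypt_from_scyphrogram : String × String × String × String := ("abcd", "a", "b", "ab")

def Spec_decrypt_from_scyphrogram (scyphrogram : String) (white_key : String) (black_key : String) (chars : String) (out : String) : Prop := out = decrypt_from_scyphrogram_alt scyphrogram white_key black_key chars
instance (scyphrogram : String) (white_key : String) (black_key : String) (chars : String) (out : String) : Decidable (Spec_decrypt_from_scyphrogram scyphrogram white_key black_key chars out) := by unfold Spec_decrypt_from_scyphrogram; infer_instance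

-- ===== CLAIM (what is proved, stated in full; the proofs are below) =====
def Claim_equal_decrypt_from_scyphrogram : Prop := ∀ (scyphrogram : String) (white_key : String) (black_key : String) (chars : String), Dom_decrypt_from_scyphrogram scyphrogram white_key black_key chars → Pre_decrypt_from_scyphrogram scyphrogram white_key black_key chars → Spec_decrypt_from_scyphrogram scyphrogram white_key black_key chars (decrypt_from_scyphrogram scyphrogram white_key black_key chars)

-- ===== LEMMAS AND PROOFS =====

lemma pvIsqrtAux_pos (n : Nat) (hn : 0 < n) : ∀ k, 0 < k → 0 < pvIsqrtAux n k := by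
  intro k
  induction k with
  | zero => intro h; omega
  | succ k ih =>
      intro _
      simp only [pvIsqrtAux]
      split_ifs with h
      · omega
      · rcases Nat.eq_zero_or_pos k with hk | hk
        · subst hk; simp at h; omega
        · exact ih hk

lemma pvIsqrt_pos (n : Nat) (hn : 0 < n) : 0 < pvIsqrt n := pvIsqrtAux_pos n hn n hn

-- Proof-only helper: the inner reads of A written with one running linear index (not a port).
def pvIdxLoop (t : List Char) (area : Nat) : Nat → Nat → List Char
  | _, 0 => []
  | s, fuel + 1 =>
      if s % area < t.length then t.getD (s % area) ' ' :: pvIdxLoop t area (s + 1) fuel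
      else []

lemma pvIdxLoop_mod (t : List Char) (area : Nat) :
    ∀ fuel s, pvIdxLoop t area s fuel = pvIdxLoop t area (s % area) fuel := by
  intro fuel
  induction fuel with
  | zero => intro s; rfl
  | succ f ih =>
      intro s
      have h0 : s % area % area = s % area := Nat.mod_mod_of_dvd s dvd_rfl
      simp only [pvIdxLoop, h0]
      split_ifs with h
      · rw [ih (s + 1), ih (s % area + 1), Nat.mod_add_mod]
      · rfl

-- A's carry step on (x, y) is +1 on the linear index, modulo table_size².
lemma pvStep (ts x y : Nat) (hx : x < ts) (hy : y < ts) :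
    (if (x + 1) % ts = 0 then (y + 1) % ts else y) * ts + (x + 1) % ts
      = (y * ts + x + 1) % (ts * ts) ∧ (x + 1) % ts < ts ∧
        (if (x + 1) % ts = 0 then (y + 1) % ts else y) < ts := by
  have hts : 0 < ts := Nat.lt_of_le_of_lt (Nat.zero_le x) hx
  rcases Nat.lt_or_ge (x + 1) ts with h | h
  · have hx1 : (x + 1) % ts = x + 1 := Nat.mod_eq_of_lt h
    have hne : (x + 1) % ts ≠ 0 := by omega
    rw [if_neg hne, hx1]
    refine ⟨?_, by omega, hy⟩
    rw [Nat.mod_eq_of_lt (by nlinarith : y * ts + x + 1 < ts * ts)]; ring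
  · have hx1 : x + 1 = ts := by omega
    have hx0 : (x + 1) % ts = 0 := by rw [hx1, Nat.mod_self]
    rw [if_pos hx0, hx0]
    rcases Nat.lt_or_ge (y + 1) ts with h2 | h2
    · have hy1 : (y + 1) % ts = y + 1 := Nat.mod_eq_of_lt h2
      rw [hy1]
      refine ⟨?_, hts, h2⟩
      rw [Nat.mod_eq_of_lt (by nlinarith : y * ts + x + 1 < ts * ts)]; nlinarith
    · have hy1 : y + 1 = ts := by omega
      have hy0 : (y + 1) % ts = 0 := by rw [hy1, Nat.mod_self]
      rw [hy0]
      refine ⟨?_, hts, hts⟩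
      have he : y * ts + x + 1 = ts * ts := by nlinarith
      rw [he, Nat.mod_self]; ring

-- A's (x, y) loop is the linear-index read loop.
lemma pvAInner_eq_idx (t : List Char) (ts : Nat) :
    ∀ fuel x y acc, x < ts → y < ts →
      pvAInner t ts fuel x y acc = acc ++ pvIdxLoop t (ts * ts) (y * ts + x) fuel := by
  intro fuel
  induction fuel with
  | zero => intro x y acc _ _; simp [pvAInner, pvIdxLoop]
  | succ f ih =>
      intro x y acc hx hy
      have hts : 0 < ts := Nat.lt_of_le_of_lt (Nat.zero_le x) hx
      have hlt : y * ts + x < ts * ts := by nlinarith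
      have hmod : (y * ts + x) % (ts * ts) = y * ts + x := Nat.mod_eq_of_lt hlt
      simp only [pvAInner, pvIdxLoop, hmod]
      by_cases h : y * ts + x < t.length
      · rw [if_pos h, if_pos h]
        obtain ⟨hlin, hx', hy'⟩ := pvStep ts x y hx hy
        rw [ih _ _ _ hx' hy', hlin,
            ← pvIdxLoop_mod t (ts * ts) f (y * ts + x + 1)]
        simp
      · rw [if_neg h, if_neg h, List.append_nil]

-- Partial table (length < area): the reads are a plain truncating slice from start.
lemma pvIdxLoop_partial (t : List Char) (area : Nat) (hlen : t.length < area) :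
    ∀ fuel s, s < area → pvIdxLoop t area s fuel = (t.drop s).take fuel := by
  intro fuel
  induction fuel with
  | zero => intro s _; simp [pvIdxLoop]
  | succ f ih =>
      intro s hs
      have hmod : s % area = s := Nat.mod_eq_of_lt hs
      simp only [pvIdxLoop, hmod]
      split_ifs with h
      · have hdrop : t.drop s = t[s] :: t.drop (s + 1) := List.drop_eq_getElem_cons h
        rw [ih (s + 1) (by omega), hdrop, List.take_succ_cons]
        congr 1
        simp [List.getD, List.getElem?_eq_getElem h]
      · rw [List.drop_eq_nil_of_le (by omega), List.take_nil]

lemma pvRep_length (t : List Char) (N : Nat) :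
    ((List.replicate N t).flatten).length = N * t.length := by
  induction N with
  | zero => simp
  | succ n ih => simp [List.replicate_succ, ih]; ring

lemma pvRep_getD (t : List Char) :
    ∀ N s, s < N * t.length →
      ((List.replicate N t).flatten).getD s ' ' = t.getD (s % t.length) ' ' := by
  intro N
  induction N with
  | zero => intro s h; omega
  | succ n ih =>
      intro s h
      rw [List.replicate_succ, List.flatten_cons]
      rcases Nat.lt_or_ge s t.length with hs | hs
      · rw [List.getD_append _ _ _ _ hs, Nat.mod_eq_of_lt hs]  -- s within the first copy
      · have hmul : (n + 1) * t.length = n * t.length + t.length := by ring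
        rw [List.getD_append_right _ _ _ _ hs, ih (s - t.length) (by omega)]
        congr 1
        conv_rhs => rw [show s = (s - t.length) + 1 * t.length by omega]
        rw [Nat.add_mul_mod_self_right]

-- Full table (length = area): the reads are a slice of the cyclically repeated table.
lemma pvIdxLoop_full (t : List Char) (area : Nat) (ha : 0 < area) (hlen : t.length = area) :
    ∀ fuel N s, s + fuel ≤ N * area →
      pvIdxLoop t area s fuel = (((List.replicate N t).flatten).drop s).take fuel := by
  intro fuel
  induction fuel with
  | zero => intro N s _; simp [pvIdxLoop]
  | succ f ih =>
      intro N s hb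
      have hmodlt : s % area < area := Nat.mod_lt _ ha
      have hcond : s % area < t.length := by omega
      simp only [pvIdxLoop, if_pos hcond]
      have hslen : s < ((List.replicate N t).flatten).length := by
        rw [pvRep_length, hlen]; omega
      rw [List.drop_eq_getElem_cons hslen, List.take_succ_cons, ih N (s + 1) (by omega)]
      congr 1
      have := pvRep_getD t N s (by rw [hlen]; omega)
      rw [← hlen] at *
      simpa [List.getD, List.getElem?_eq_getElem hslen] using this.symm

-- The two coordinate formulas agree: (a+1)+(b+1) ≡ a+b+2.
lemma pvCoord_eq (w b cs : List Char) (ts i : Nat) :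
    pvGetCoordinates (b.getD (i % b.length) ' ') (w.getD (i % w.length) ' ') cs ts
      = pvCoord w b cs ts i := by
  simp only [pvGetCoordinates, pvCoord]
  congr 1
  ring

-- ceil(x/area) copies of an area-sized table cover the first x positions.
lemma pvCeil_mul (x area : Nat) (ha : 0 < area) : x ≤ ((x + area - 1) / area) * area := by
  by_contra hcon
  push_neg at hcon
  set q := (x + area - 1) / area with hq
  have h1 : (q + 1) * area ≤ x + area - 1 := by
    have hx : q * area + area ≤ x + area - 1 := by
      generalize hgen : q * area = p at hcon ⊢
      omega
    calc (q + 1) * area = q * area + area := by ring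
    _ ≤ x + area - 1 := hx
  have h2 : q + 1 ≤ (x + area - 1) / area := (Nat.le_div_iff_mul_le ha).mpr h1
  omega

-- One table: A's 10 reads equal B's single slice.
lemma pvPiece_eq (t w b cs : List Char) (ts i : Nat) (hts : 0 < ts) (htle : t.length ≤ ts * ts) :
    pvAInner t ts 10
      (pvGetCoordinates (b.getD (i % b.length) ' ') (w.getD (i % w.length) ' ') cs ts)
      (pvGetCoordinates (b.getD ((i + 1) % b.length) ' ') (w.getD ((i + 1) % w.length) ' ') cs ts) []
    = (if t.length = ts * ts then
         PySem.List.slice ((List.replicate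
             ((pvCoord w b cs ts (i + 1) * ts + pvCoord w b cs ts i + 10 + ts * ts - 1) / (ts * ts)) t).flatten)
           (some ((pvCoord w b cs ts (i + 1) * ts + pvCoord w b cs ts i : Nat) : Int))
           (some (((pvCoord w b cs ts (i + 1) * ts + pvCoord w b cs ts i : Nat) : Int) + 10))
       else
         PySem.List.slice t
           (some ((pvCoord w b cs ts (i + 1) * ts + pvCoord w b cs ts i : Nat) : Int))
           (some (((pvCoord w b cs ts (i + 1) * ts + pvCoord w b cs ts i : Nat) : Int) + 10))) := by
  have hopal : pvGetCoordinates (b.getD (i % b.length) ' ') (w.getD (i % w.length) ' ') cs ts < ts :=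
    Nat.mod_lt _ hts
  have hiryd : pvGetCoordinates (b.getD ((i + 1) % b.length) ' ') (w.getD ((i + 1) % w.length) ' ') cs ts < ts :=
    Nat.mod_lt _ hts
  rw [pvAInner_eq_idx t ts 10 _ _ [] hopal hiryd, List.nil_append]
  rw [pvCoord_eq w b cs ts i, pvCoord_eq w b cs ts (i + 1)] at *
  set start := pvCoord w b cs ts (i + 1) * ts + pvCoord w b cs ts i with hstart
  have hslt : start < ts * ts := by nlinarith
  split_ifs with h
  · rw [show ((start : Int) + 10) = ((start : Int) + ((10 : Nat) : Int)) by norm_num,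
        PySem.List.slice_natCast_add]
    exact pvIdxLoop_full t (ts * ts) (by positivity) h 10 _ start
      (pvCeil_mul (start + 10) (ts * ts) (by positivity))
  · rw [show ((start : Int) + 10) = ((start : Int) + ((10 : Nat) : Int)) by norm_num,
        PySem.List.slice_natCast_add]
    exact pvIdxLoop_partial t (ts * ts) (by omega) 10 start hslt

lemma pvSlice_len_le (s : List Char) (a b : Int) (area : Nat)
    (hb : b = a + (area : Int)) :
    (PySem.List.slice s (some a) (some b)).length ≤ area := by
  rw [PySem.List.length_slice]
  have h1 := PySem.List.clampIdx_le s.length a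
  have h2 := PySem.List.clampIdx_le s.length b
  -- clampIdx is monotone within [0, len]; bound the difference by area directly
  have h3 : PySem.List.clampIdx s.length b ≤ PySem.List.clampIdx s.length a + area := by
    simp only [PySem.List.clampIdx] at *
    split_ifs at * <;> omega
  omega

-- Outer loops: A over the pre-sliced tables, B slicing as it goes, same list of bases.
lemma pvGo_eq (s w b cs : List Char) (ts : Nat) (hts : 0 < ts) :
    ∀ (r : List Int) (i : Nat) (acc : List (List Char)),
      pvAGo w b cs ts
        (r.map (fun base => PySem.List.slice s (some base) (some (base + ((ts * ts : Nat) : Int))))) i acc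
      = pvBGo s w b cs ts (ts * ts) r i acc := by
  intro r
  induction r with
  | nil => intro i acc; simp [pvAGo, pvBGo]
  | cons base rest ih =>
      intro i acc
      simp only [List.map_cons, pvAGo, pvBGo]
      rw [ih, pvPiece_eq _ w b cs ts i hts
        (pvSlice_len_le s base (base + ((ts * ts : Nat) : Int)) (ts * ts) rfl)]

-- ===== VERDICT (by name: the statement is the Claim_ definition above) =====
theorem decrypt_from_scyphrogram_spec : Claim_equal_decrypt_from_scyphrogram := by
  intro scy wk bk chars _hdom hpre
  simp only [Pre_decrypt_from_scyphrogram, Bool.and_eq_true, Bool.not_eq_true'] at hpre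
  obtain ⟨⟨⟨hs', _⟩, _⟩, _⟩ := hpre
  have hs : scy.toList ≠ [] := by intro h; rw [h] at hs'; simp at hs'
  have hts : 0 < pvIsqrt scy.toList.length :=
    pvIsqrt_pos _ (List.length_pos_iff.mpr hs)
  simp only [Spec_decrypt_from_scyphrogram, decrypt_from_scyphrogram, decrypt_from_scyphrogram_alt]
  congr 1
  rw [pvGo_eq scy.toList wk.toList bk.toList chars.toList _ hts
    (PySem.List.pyRange 0 (scy.toList.length : Int)
      ((pvIsqrt scy.toList.length * pvIsqrt scy.toList.length : Nat) : Int)) 0 []]
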